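-- pv_equiv track=rewrite | github.com/seijimadrigal/memcloud | cloud/app/engine.py | _extract_query_entities_simple
-- ===== SOURCE A (Python) =====
-- from typing import Optional, List, Dict, Any
--
-- def _extract_query_entities_simple(query: str) -> List[str]:
--     """Simple entity extraction from query."""
--     skip = {"what", "when", "where", "who", "how", "why", "did", "does",
--             "is", "are", "was", "were", "the", "a", "an", "in", "on",
--             "at", "to", "for", "of", "with", "and", "or", "not", "has",
--             "have", "had", "do", "will", "would", "could", "should",
--             "about", "from", "by", "that", "this", "it", "they", "he",
--             "she", "his", "her", "their", "its", "my", "your"}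
--     words = query.split()
--     entities = []
--     current = []
--     for w in words:
--         if w.lower() in skip:
--             if current:
--                 entities.append(" ".join(current))
--                 current = []
--             continue
--         current.append(w.rstrip("?.,!"))
--     if current:
--         entities.append(" ".join(current))
--     return [e for e in entities if len(e) > 1]
-- ===== SOURCE B (Python) =====
-- from typing import List
--
-- def _extract_query_entities_simple(query: str) -> List[str]:
--     """Entity extraction by repeatedly splitting at the first stopword index."""
--     skip = {"what", "when", "where", "who", "how", "why", "did", "does",
--             "is", "are", "was", "were", "the", "a", "an", "in", "on",
--             "at", "to", "for", "of", "with", "and", "or", "not", "has",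
--             "have", "had", "do", "will", "would", "could", "should",
--             "about", "from", "by", "that", "this", "it", "they", "he",
--             "she", "his", "her", "their", "its", "my", "your"}
--     ws = query.split()
--     segs = []
--     while True:
--         i = next((i for i, w in enumerate(ws) if w.lower() in skip), None)
--         if i is None:
--             segs.append(ws)
--             break
--         segs.append(ws[:i])
--         ws = ws[i + 1:]
--     phrases = (" ".join(w.rstrip("?.,!") for w in seg) for seg in segs)
--     return [p for p in phrases if len(p) > 1]
-- ===== Notes on version B (the rewrite author's own statement) =====
-- stated objective: alternative
-- what changed: Replaces A's per-word accumulator-and-flush loop with a loop that repeatedly finds the index of the first stopword, slices the prefix off as a whole segment and continues on the suffix, then joins/strips and length-filters the segments in a separate stage.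
import Mathlib
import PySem

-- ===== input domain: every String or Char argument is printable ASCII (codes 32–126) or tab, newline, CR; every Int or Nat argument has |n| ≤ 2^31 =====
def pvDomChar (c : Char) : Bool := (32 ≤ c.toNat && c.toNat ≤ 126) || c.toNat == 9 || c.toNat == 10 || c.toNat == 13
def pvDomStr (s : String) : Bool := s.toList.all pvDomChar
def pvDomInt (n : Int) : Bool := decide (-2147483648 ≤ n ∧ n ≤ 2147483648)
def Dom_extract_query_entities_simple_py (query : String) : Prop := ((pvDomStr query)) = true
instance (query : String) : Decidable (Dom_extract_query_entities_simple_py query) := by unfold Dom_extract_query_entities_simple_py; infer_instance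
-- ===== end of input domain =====

-- B replaces A's per-word accumulator-and-flush loop with a repeated "find the index of the
-- first stopword, cut the prefix off as a whole segment, continue on the suffix" loop, joining
-- and filtering the collected segments in a separate stage; objective: alternative.

-- shared vocabulary (identical literals in both Python sources)
def pvSkip : List String := ["what", "when", "where", "who", "how", "why", "did", "does",
  "is", "are", "was", "were", "the", "a", "an", "in", "on",
  "at", "to", "for", "of", "with", "and", "or", "not", "has",
  "have", "had", "do", "will", "would", "could", "should",
  "about", "from", "by", "that", "this", "it", "they", "he",
  "she", "his", "her", "their", "its", "my", "your"]

def pvKey (w : String) : Bool := pvSkip.contains (PySem.Str.lower w)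

-- w.rstrip("?.,!") : hand port (PySem has no rstrip-with-chars); exact: drops exactly the
-- trailing run of characters from "?.,!".
def pvRstrip (w : String) : String :=
  String.ofList ((w.toList.reverse.dropWhile (fun c => c == '?' || c == '.' || c == ',' || c == '!')).reverse)

-- ===== PORT A =====
-- the for-loop of A with state (emitted entities, current), flushed at the end
def pvGoA (cur : List String) : List String → List String
  | [] => if cur = [] then [] else [PySem.Str.join " " cur]
  | w :: ws =>
      if pvKey w then
        if cur = [] then pvGoA [] ws else PySem.Str.join " " cur :: pvGoA [] ws
      else pvGoA (cur ++ [pvRstrip w]) ws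

def extract_query_entities_simple_py (query : String) : List String :=
  (pvGoA [] (PySem.Str.split₀ query)).filter (fun e => decide (1 < PySem.Str.len e))

-- ===== PORT B =====
-- Source B's while loop: find the first stopword index (next(... enumerate ...) ≈ findIdx?),
-- append the prefix segment, continue on the suffix after the stopword
def pvSegsLoop (segs : List (List String)) (ws : List String) : List (List String) :=
  match h : ws.findIdx? pvKey with
  | none => segs ++ [ws]
  | some i => pvSegsLoop (segs ++ [ws.take i]) (ws.drop (i + 1))
termination_by ws.length
decreasing_by
  cases ws with
  | nil => simp [List.findIdx?_nil] at h
  | cons a l => simp [List.length_drop]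

def extract_query_entities_simple_py_alt (query : String) : List String :=
  (((pvSegsLoop [] (PySem.Str.split₀ query)).map
      (fun seg => PySem.Str.join " " (seg.map pvRstrip))).filter
    (fun e => decide (1 < PySem.Str.len e)))

-- ===== PRECONDITION & SPEC =====
def Spec_extract_query_entities_simple_py (query : String) (out : List String) : Prop := out = extract_query_entities_simple_py_alt query
instance (query : String) (out : List String) : Decidable (Spec_extract_query_entities_simple_py query out) := by unfold Spec_extract_query_entities_simple_py; infer_instance

-- ===== CLAIM (what is proved, stated in full; the proofs are below) =====
def Claim_equal_extract_query_entities_simple_py : Prop := ∀ (query : String), Dom_extract_query_entities_simple_py query → Spec_extract_query_entities_simple_py query (extract_query_entities_simple_py query)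

-- ===== LEMMAS AND PROOFS =====

-- both programs are related to List.splitOnP pvKey on the word list

lemma pvSplitOnP_of_findIdx?_none {α : Type} (p : α → Bool) :
    ∀ ws : List α, ws.findIdx? p = none → List.splitOnP p ws = [ws] := by
  intro ws
  induction ws with
  | nil => intro _; simp
  | cons a l ih =>
    intro h
    rw [List.findIdx?_cons] at h
    by_cases hp : p a = true
    · rw [if_pos hp] at h; cases h
    · rw [if_neg hp, Option.map_eq_none_iff] at h
      rw [List.splitOnP_cons, if_neg hp, ih h]
      rfl

lemma pvSplitOnP_of_findIdx?_some {α : Type} (p : α → Bool) :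
    ∀ (ws : List α) (i : Nat), ws.findIdx? p = some i →
      List.splitOnP p ws = ws.take i :: List.splitOnP p (ws.drop (i + 1)) := by
  intro ws
  induction ws with
  | nil => intro i h; simp [List.findIdx?_nil] at h
  | cons a l ih =>
    intro i h
    rw [List.findIdx?_cons] at h
    by_cases hp : p a = true
    · rw [if_pos hp] at h
      obtain rfl : (0 : Nat) = i := Option.some.inj h
      simp [List.splitOnP_cons, hp]
    · rw [if_neg hp, Option.map_eq_some_iff] at h
      obtain ⟨j, hj, rfl⟩ := h
      simp [List.splitOnP_cons, hp, ih j hj]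

lemma pvSegsLoop_eq : ∀ (segs : List (List String)) (ws : List String),
    pvSegsLoop segs ws = segs ++ List.splitOnP pvKey ws := by
  intro segs ws
  induction segs, ws using pvSegsLoop.induct with
  | case1 segs ws h => rw [pvSegsLoop, h, pvSplitOnP_of_findIdx?_none pvKey ws h]
  | case2 segs ws i h ih =>
    rw [pvSegsLoop]
    split
    · next hnone => rw [hnone] at h; cases h
    · next j hsome =>
      rw [hsome] at h
      obtain rfl : j = i := Option.some.inj h
      rw [ih, pvSplitOnP_of_findIdx?_some pvKey ws j hsome]
      simp

lemma pvMapModifyHead {α β : Type} (f : α → α) (g : α → β) (h : β → β)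
    (H : ∀ x, g (f x) = h (g x)) :
    ∀ l : List α, (l.modifyHead f).map g = (l.map g).modifyHead h := by
  intro l; cases l <;> simp [H]

-- A's loop over the splitOnP segments, with the accumulator prepended to the first segment
lemma pvGoA_eq : ∀ (ws : List String) (cur : List String),
    pvGoA cur ws =
      ((((List.splitOnP pvKey ws).map (List.map pvRstrip)).modifyHead
          (fun s => cur ++ s)).filter (fun s => !s.isEmpty)).map (PySem.Str.join " ") := by
  intro ws
  induction ws with
  | nil =>
    intro cur
    cases cur <;> simp [pvGoA]
  | cons w ws ih =>
    intro cur
    by_cases hw : pvKey w = true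
    · rw [List.splitOnP_cons]
      simp only [hw, if_pos]
      have h0 : pvGoA [] ws =
          (((List.splitOnP pvKey ws).map (List.map pvRstrip)).filter
            (fun s => !s.isEmpty)).map (PySem.Str.join " ") := by
        rw [ih []]
        congr 1
        cases ((List.splitOnP pvKey ws).map (List.map pvRstrip)) <;> simp
      cases cur with
      | nil => simpa [pvGoA, hw] using h0
      | cons c cs => simp [pvGoA, hw, h0]
    · rw [List.splitOnP_cons]
      simp only [hw, Bool.false_eq_true, if_false]
      rw [pvMapModifyHead (List.cons w) (List.map pvRstrip) (fun s => pvRstrip w :: s)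
        (by intro x; simp)]
      rw [List.modifyHead_modifyHead]
      have : ((fun s => cur ++ s) ∘ fun s => pvRstrip w :: s) =
          (fun s => (cur ++ [pvRstrip w]) ++ s) := by
        funext s; simp
      rw [this, ← ih (cur ++ [pvRstrip w])]
      simp [pvGoA, hw]

-- dropping empty segments before joining does not matter: they join to "" and len "" = 0
lemma pvFilterJoin : ∀ (M : List (List String)),
    ((M.filter (fun s => !s.isEmpty)).map (PySem.Str.join " ")).filter
        (fun e => decide (1 < PySem.Str.len e)) =
      (M.map (PySem.Str.join " ")).filter (fun e => decide (1 < PySem.Str.len e)) := by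
  intro M
  induction M with
  | nil => rfl
  | cons s rest ih =>
    cases s with
    | nil => simpa [show (decide (1 < PySem.Str.len (PySem.Str.join " " ([] : List String)))) = false from rfl]
        using ih
    | cons x xs =>
      have hkeep : List.filter (fun s => !s.isEmpty) ((x :: xs) :: rest) =
          (x :: xs) :: List.filter (fun s => !s.isEmpty) rest := by simp
      rw [hkeep, List.map_cons, List.filter_cons, List.map_cons, List.filter_cons, ih]

-- ===== VERDICT (by name: the statement is the Claim_ definition above) =====
theorem extract_query_entities_simple_py_spec : Claim_equal_extract_query_entities_simple_py := by
  intro query _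
  unfold Spec_extract_query_entities_simple_py extract_query_entities_simple_py
    extract_query_entities_simple_py_alt
  rw [pvGoA_eq (PySem.Str.split₀ query) [], pvSegsLoop_eq [] (PySem.Str.split₀ query)]
  have hid : (((List.splitOnP pvKey (PySem.Str.split₀ query)).map (List.map pvRstrip)).modifyHead
      (fun s => [] ++ s)) = ((List.splitOnP pvKey (PySem.Str.split₀ query)).map (List.map pvRstrip)) := by
    cases ((List.splitOnP pvKey (PySem.Str.split₀ query)).map (List.map pvRstrip)) <;> simp
  rw [hid, pvFilterJoin]
  simp only [List.map_map]
  rfl
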